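-- pv_equiv track=rewrite | github.com/JianghanLi/LintCode | Contest 53 Weekly #33/1586. 最少按键次数/luoemail.py | getAns
-- ===== SOURCE A (Python) =====
-- def getAns(s):
--     # Write your code here
--     isupper = []
--     for c in s:
--         if c.isupper():
--             isupper.append(1)
--         else:
--             isupper.append(0)
--
--     status = 0
--     stroke = 0
--
--     for i in range(len(s)):
--         if isupper[i] == status:
--             stroke += 1
--         else:
--             if i < len(s) - 1 and isupper[i] == isupper[i + 1]:
--                 # press caps lock
--                 status = 1 - status
--                 stroke += 2
--             else:
--                 # press shift
--                 stroke += 2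
--
--     return stroke
-- ===== SOURCE B (Python) =====
-- def getAns(s):
--     # run-based pass: process maximal same-case runs instead of char + lookahead
--     flags = [c.isupper() for c in s]
--     N = len(flags)
--     status = False
--     stroke = 0
--     i = 0
--     while i < N:
--         f = flags[i]
--         j = i + 1
--         while j < N and flags[j] == f:
--             j += 1
--         n = j - i
--         if f == status:
--             stroke += n          # every char of the run matches the lock state
--         elif n == 1:
--             stroke += 2          # shift once
--         else:
--             stroke += n + 1      # caps lock + run, state flips
--             status = not status
--         i = j
--     return stroke
-- ===== Notes on version B (the rewrite author's own statement) =====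
-- stated objective: alternative
-- what changed: Replaces A's per-character loop with one-char lookahead and per-char stroke updates by a run-based scan: find each maximal same-case run and add its cost (length if it matches the lock state, 2 for a lone mismatching char, length+1 with a state flip otherwise).
import Mathlib
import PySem

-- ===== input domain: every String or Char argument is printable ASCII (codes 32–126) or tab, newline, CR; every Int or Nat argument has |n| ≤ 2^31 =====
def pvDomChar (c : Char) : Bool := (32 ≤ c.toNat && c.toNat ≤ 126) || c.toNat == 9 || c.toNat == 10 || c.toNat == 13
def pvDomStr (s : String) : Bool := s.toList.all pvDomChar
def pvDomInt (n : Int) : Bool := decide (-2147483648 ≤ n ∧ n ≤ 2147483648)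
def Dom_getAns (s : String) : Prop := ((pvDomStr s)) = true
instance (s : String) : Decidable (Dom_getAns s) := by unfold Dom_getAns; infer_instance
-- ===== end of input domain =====

-- B is a run-based scan over maximal same-case runs (alternative decomposition, same cost); return value only, no mutation.

-- ===== PORT A =====
-- per-char loop with one-char lookahead; isupper[i] is always in range, so pyGetD's default is never used
def getAnsLoop (isupper : List Int) (n : Nat) (status stroke : Int) (i : Nat) : Int :=
  if i < n then
    if PySem.List.pyGetD isupper (i : Int) 0 == status then
      getAnsLoop isupper n status (stroke + 1) (i + 1)
    else if decide (i < n - 1) && (PySem.List.pyGetD isupper (i : Int) 0 == PySem.List.pyGetD isupper ((i : Int) + 1) 0) then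
      getAnsLoop isupper n (1 - status) (stroke + 2) (i + 1)
    else
      getAnsLoop isupper n status (stroke + 2) (i + 1)
  else stroke
termination_by n - i

def getAns (s : String) : Int :=
  let isupper := s.toList.foldl (fun acc c => if PySem.Chars.isupper c then acc ++ [(1 : Int)] else acc ++ [(0 : Int)]) []
  getAnsLoop isupper s.toList.length 0 0 0

-- ===== PORT B =====
-- inner while loop: advance j past the current run of case f
def pvRunEnd (flags : List Bool) (N : Nat) (f : Bool) (j : Nat) : Nat :=
  if h : j < N ∧ PySem.List.pyGetD flags (j : Int) false == f then
    pvRunEnd flags N f (j + 1)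
  else j
termination_by N - j
decreasing_by obtain ⟨h1, -⟩ := h; omega

theorem pvRunEnd_ge (flags : List Bool) (N : Nat) (f : Bool) (j : Nat) :
    j ≤ pvRunEnd flags N f j := by
  fun_induction pvRunEnd with
  | case1 => omega
  | case2 => omega

-- outer while loop over run starts
def pvLoopB (flags : List Bool) (N : Nat) (status : Bool) (stroke : Int) (i : Nat) : Int :=
  if h : i < N then
    let f := PySem.List.pyGetD flags (i : Int) false
    let j := pvRunEnd flags N f (i + 1)
    let n : Int := (j : Int) - (i : Int)
    if f == status then pvLoopB flags N status (stroke + n) j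
    else if n == 1 then pvLoopB flags N status (stroke + 2) j
    else pvLoopB flags N (!status) (stroke + n + 1) j
  else stroke
termination_by N - i
decreasing_by all_goals
  (have := pvRunEnd_ge flags N (PySem.List.pyGetD flags (i : Int) false) (i + 1); omega)

def getAns_alt (s : String) : Int :=
  let flags := s.toList.map (fun c => PySem.Chars.isupper c)
  pvLoopB flags flags.length false 0 0

-- ===== PRECONDITION & SPEC =====
def Spec_getAns (s : String) (out : Int) : Prop := out = getAns_alt s
instance (s : String) (out : Int) : Decidable (Spec_getAns s out) := by unfold Spec_getAns; infer_instance

-- ===== CLAIM (what is proved, stated in full; the proofs are below) =====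
def Claim_equal_getAns : Prop := ∀ (s : String), Dom_getAns s → Spec_getAns s (getAns s)

-- ===== LEMMAS AND PROOFS =====

-- common specification: per-run/per-char cost on the case pattern
def pvSpec : List Bool → Bool → Int
  | [], _ => 0
  | f :: tl, st =>
    if f = st then 1 + pvSpec tl st
    else if tl.head? = some f then 2 + pvSpec tl (!st)
    else 2 + pvSpec tl st

def pvB2I (b : Bool) : Int := if b then 1 else 0

theorem pvB2I_inj (x y : Bool) : (pvB2I x == pvB2I y) = (x == y) := by
  cases x <;> cases y <;> decide

theorem pvB2I_not (b : Bool) : 1 - pvB2I b = pvB2I (!b) := by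
  cases b <;> decide

theorem pvFoldl_eq_map (l : List Char) (acc : List Int) :
    l.foldl (fun acc c => if PySem.Chars.isupper c then acc ++ [(1 : Int)] else acc ++ [(0 : Int)]) acc
      = acc ++ l.map (fun c => pvB2I (PySem.Chars.isupper c)) := by
  induction l generalizing acc with
  | nil => simp
  | cons c l ih =>
    simp only [List.foldl_cons, List.map_cons, ih, pvB2I]
    by_cases h : PySem.Chars.isupper c <;> simp [h]

theorem pvLoopA_eq (bs : List Bool) (st : Bool) (stroke : Int) (i : Nat) :
    getAnsLoop (bs.map pvB2I) bs.length (pvB2I st) stroke i = stroke + pvSpec (bs.drop i) st := by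
  induction h : bs.length - i generalizing st stroke i with
  | zero =>
    rw [getAnsLoop, if_neg (by omega), List.drop_of_length_le (by omega)]
    simp [pvSpec]
  | succ n ih =>
    have hi : i < bs.length := by omega
    have hui : PySem.List.pyGetD (bs.map pvB2I) (i : Int) 0 = pvB2I bs[i] := by
      simp [List.getElem?_eq_getElem hi]
    rw [getAnsLoop, if_pos hi, hui, pvB2I_inj, List.drop_eq_getElem_cons hi]
    by_cases hst : bs[i] = st
    · rw [if_pos (by simpa using hst), pvSpec, if_pos hst, ih st (stroke + 1) (i + 1) (by omega)]
      ring
    · rw [if_neg (by simpa using hst)]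
      by_cases hlast : i < bs.length - 1
      · have hi1 : i + 1 < bs.length := by omega
        have hui1 : PySem.List.pyGetD (bs.map pvB2I) ((i : Int) + 1) 0 = pvB2I bs[i + 1] := by
          rw [show ((i : Int) + 1) = ((i + 1 : Nat) : Int) by push_cast; ring,
              PySem.List.pyGetD_natCast, List.getD_eq_getElem _ _ (by simpa using hi1)]
          simp
        have hhead : (bs.drop (i + 1)).head? = some bs[i + 1] := by
          rw [List.drop_eq_getElem_cons hi1]; rfl
        rw [hui1, pvB2I_inj]
        by_cases hnx : bs[i] = bs[i + 1]
        · rw [if_pos (by simp [hlast, hnx]), pvB2I_not,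
              ih (!st) (stroke + 2) (i + 1) (by omega), pvSpec, if_neg hst,
              if_pos (by rw [hhead, hnx])]
          ring
        · rw [if_neg (by simp [hnx]), ih st (stroke + 2) (i + 1) (by omega), pvSpec,
              if_neg hst, if_neg (by rw [hhead]; simpa using fun hx => hnx hx.symm)]
          ring
      · have hdrop : bs.drop (i + 1) = [] := List.drop_of_length_le (by omega)
        rw [if_neg (by simp [hlast]), ih st (stroke + 2) (i + 1) (by omega), pvSpec,
            if_neg hst, if_neg (by rw [hdrop]; simp)]
        ring

-- pvSpec over a matching run
theorem pvSpec_run_match (n : Nat) (f : Bool) (rest : List Bool) :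
    pvSpec (List.replicate n f ++ rest) f = n + pvSpec rest f := by
  induction n with
  | zero => simp
  | succ m ih =>
    simp only [List.replicate_succ, List.cons_append, pvSpec, ih]
    push_cast; ring

-- pvSpec over a mismatching run of length ≥ 2: caps lock, state flips
theorem pvSpec_run_flip (m : Nat) (hm : 1 ≤ m) (f : Bool) (rest : List Bool) :
    pvSpec (List.replicate (m + 1) f ++ rest) (!f) = (m + 2 : Int) + pvSpec rest f := by
  obtain ⟨k, rfl⟩ := Nat.exists_eq_add_of_le hm
  have hne : f ≠ (!f) := by cases f <;> decide
  have hh : ((List.replicate (1 + k) f ++ rest).head? = some f) := by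
    rw [show 1 + k = k + 1 by omega, List.replicate_succ]
    simp
  rw [show 1 + k + 1 = (1 + k) + 1 from rfl, List.replicate_succ, List.cons_append]
  show pvSpec (f :: (List.replicate (1 + k) f ++ rest)) (!f) = _
  rw [pvSpec, if_neg hne, hh, if_pos rfl, Bool.not_not, pvSpec_run_match]
  push_cast; ring

-- pvRunEnd characterization via a leading-run counter
def pvCnt (f : Bool) : List Bool → Nat
  | [] => 0
  | x :: l => if x = f then pvCnt f l + 1 else 0

theorem pvRunEnd_eq (flags : List Bool) (f : Bool) (j : Nat) :
    pvRunEnd flags flags.length f j = j + pvCnt f (flags.drop j) := by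
  fun_induction pvRunEnd flags flags.length f j with
  | case1 j h ih =>
    obtain ⟨h1, h2⟩ := h
    have hf : flags[j] = f := by
      have := eq_of_beq h2
      simpa [List.getElem?_eq_getElem h1] using this
    rw [List.drop_eq_getElem_cons h1, ih]
    simp [pvCnt, hf]
    omega
  | case2 j h =>
    by_cases h1 : j < flags.length
    · have h2 : ¬ (PySem.List.pyGetD flags (j : Int) false == f) := fun hb => h ⟨h1, hb⟩
      have hf : flags[j] ≠ f := by
        intro heq
        exact h2 (by simp [List.getElem?_eq_getElem h1, heq])
      rw [List.drop_eq_getElem_cons h1]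
      simp [pvCnt, hf]
    · rw [List.drop_of_length_le (by omega)]
      simp [pvCnt]

theorem pvCnt_decomp (f : Bool) (l : List Bool) :
    l = List.replicate (pvCnt f l) f ++ l.drop (pvCnt f l)
      ∧ (l.drop (pvCnt f l)).head? ≠ some f := by
  induction l with
  | nil => simp [pvCnt]
  | cons x l ih =>
    by_cases h : x = f
    · subst h
      have hc : pvCnt x (x :: l) = pvCnt x l + 1 := by simp [pvCnt]
      rw [hc]
      constructor
      · conv_lhs => rw [ih.1]
        simp [List.replicate_succ]
      · simpa using ih.2
    · simp [pvCnt, h]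

theorem pvLoopB_eq_aux (flags : List Bool) (k : Nat) :
    ∀ (st : Bool) (stroke : Int) (i : Nat), flags.length - i ≤ k →
      pvLoopB flags flags.length st stroke i = stroke + pvSpec (flags.drop i) st := by
  induction k with
  | zero =>
    intro st stroke i hk
    rw [pvLoopB, dif_neg (by omega), List.drop_of_length_le (by omega)]
    simp [pvSpec]
  | succ k ih =>
    intro st stroke i hk
    by_cases hi : i < flags.length
    · have hf : PySem.List.pyGetD flags (i : Int) false = flags[i] := by
        simp [List.getElem?_eq_getElem hi]
      set f := flags[i] with hfdef
      set c := pvCnt f (flags.drop (i + 1)) with hcdef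
      have hre : pvRunEnd flags flags.length f (i + 1) = (i + 1) + c := pvRunEnd_eq flags f (i + 1)
      have hdd : (flags.drop (i + 1)).drop c = flags.drop (i + 1 + c) := by
        rw [List.drop_drop]
      obtain ⟨hdec, hhead⟩ := pvCnt_decomp f (flags.drop (i + 1))
      rw [hdd] at hdec hhead
      have hdropi : flags.drop i = List.replicate (c + 1) f ++ flags.drop (i + 1 + c) := by
        rw [List.drop_eq_getElem_cons hi, ← hfdef, List.replicate_succ, List.cons_append, ← hdec]
      have hih : ∀ (st' : Bool) (stroke' : Int),
          pvLoopB flags flags.length st' stroke' (i + 1 + c) =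
            stroke' + pvSpec (flags.drop (i + 1 + c)) st' := by
        intro st' stroke'
        exact ih st' stroke' (i + 1 + c) (by omega)
      rw [pvLoopB, dif_pos hi]
      simp only [hf, hre]
      have hn : ((i + 1 + c : Nat) : Int) - (i : Nat) = (c : Int) + 1 := by push_cast; ring
      rw [hn]
      by_cases hst : f = st
      · rw [if_pos (beq_iff_eq.mpr hst), hih, hdropi, hst, pvSpec_run_match]
        push_cast; ring
      · rw [if_neg (fun hb => hst (beq_iff_eq.mp hb))]
        have hstval : st = !f := Bool.eq_not_of_ne (Ne.symm hst)
        by_cases hc0 : c = 0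
        · rw [if_pos (by rw [hc0]; decide), hih, hc0]
          have h1 : flags.drop i = f :: flags.drop (i + 1 + 0) := by
            rw [hdropi, hc0]
            simp [List.replicate_succ]
          rw [h1]
          simp only [pvSpec]
          rw [if_neg hst, if_neg (by rw [hc0] at hhead; exact hhead)]
          ring
        · rw [if_neg (by simp only [beq_iff_eq]; omega), hih, hdropi, hstval, Bool.not_not,
              pvSpec_run_flip c (by omega) f]
          ring
    · rw [pvLoopB, dif_neg hi, List.drop_of_length_le (by omega)]
      simp [pvSpec]

theorem pvLoopB_eq (flags : List Bool) (st : Bool) (stroke : Int) (i : Nat) :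
    pvLoopB flags flags.length st stroke i = stroke + pvSpec (flags.drop i) st :=
  pvLoopB_eq_aux flags (flags.length - i) st stroke i (le_refl _)

-- ===== VERDICT (by name: the statement is the Claim_ definition above) =====
theorem getAns_spec : Claim_equal_getAns := by
  intro s _
  unfold Spec_getAns getAns getAns_alt
  simp only [pvFoldl_eq_map, List.nil_append]
  rw [show (fun c => pvB2I (PySem.Chars.isupper c)) = pvB2I ∘ (fun c => PySem.Chars.isupper c) from rfl,
      ← List.map_map]
  rw [show s.toList.length = (s.toList.map (fun c => PySem.Chars.isupper c)).length by simp]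
  rw [show (0 : Int) = pvB2I false from rfl]
  rw [pvLoopA_eq, pvLoopB_eq]
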